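-- pv_equiv track=rewrite | github.com/IndraPur1/Algorithm-Analysis-and-Strategy | Pertemuan 3/WallE.py | hitung_grup_minimum
-- ===== SOURCE A (Python) =====
-- def merge_sort_interval(data):
--     if len(data) <= 1:
--         return data
--     tengah = len(data) // 2
--     kiri = merge_sort_interval(data[:tengah])
--     kanan = merge_sort_interval(data[tengah:])
--     return gabung(kiri, kanan)
--
-- def gabung(kiri, kanan):
--     hasil = []
--     i = 0
--     j = 0
--     while i < len(kiri) and j < len(kanan):
--         if kiri[i][0] <= kanan[j][0]:
--             hasil.append(kiri[i])
--             i += 1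
--         else:
--             hasil.append(kanan[j])
--             j += 1
--     while i < len(kiri):
--         hasil.append(kiri[i])
--         i += 1
--     while j < len(kanan):
--         hasil.append(kanan[j])
--         j += 1
--     return hasil
--
-- def hitung_grup_minimum(intervals):
--     intervals = merge_sort_interval(intervals)
--     akhir_grup = []
--
--     for interval in intervals:
--         ditempatkan = False
--         for i in range(len(akhir_grup)):
--             if interval[0] > akhir_grup[i]:
--                 akhir_grup[i] = interval[1]
--                 ditempatkan = True
--                 break
--         if not ditempatkan:
--             akhir_grup.append(interval[1])
--     return len(akhir_grup)
-- ===== SOURCE B (Python) =====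
-- def hitung_grup_minimum(intervals):
--     # Min-end greedy: keep the current groups' last ends as an ascending list;
--     # reuse the group that frees up earliest (ends[0]) instead of scanning for
--     # a first fit, and place each new end by binary search.
--     ends = []
--     for iv in sorted(intervals, key=lambda iv: iv[0]):
--         if ends and ends[0] < iv[0]:
--             ends.pop(0)
--         e = iv[1]
--         lo, hi = 0, len(ends)
--         while lo < hi:
--             mid = (lo + hi) // 2
--             if ends[mid] < e:
--                 lo = mid + 1
--             else:
--                 hi = mid
--         ends.insert(lo, e)
--     return len(ends)
-- ===== Notes on version B (the rewrite author's own statement) =====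
-- stated objective: alternative
-- what changed: Replaces the hand-written merge sort plus first-fit linear scan over group ends by the builtin stable sort plus a min-end greedy that keeps the group ends as an ascending list, evicting ends[0] and placing the new end by binary search; a coupling invariant (equal group count and, for every t at least all starts seen so far, equal count of group ends >= t) shows first-fit and min-end greedy yield the same group count.
import Mathlib
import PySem

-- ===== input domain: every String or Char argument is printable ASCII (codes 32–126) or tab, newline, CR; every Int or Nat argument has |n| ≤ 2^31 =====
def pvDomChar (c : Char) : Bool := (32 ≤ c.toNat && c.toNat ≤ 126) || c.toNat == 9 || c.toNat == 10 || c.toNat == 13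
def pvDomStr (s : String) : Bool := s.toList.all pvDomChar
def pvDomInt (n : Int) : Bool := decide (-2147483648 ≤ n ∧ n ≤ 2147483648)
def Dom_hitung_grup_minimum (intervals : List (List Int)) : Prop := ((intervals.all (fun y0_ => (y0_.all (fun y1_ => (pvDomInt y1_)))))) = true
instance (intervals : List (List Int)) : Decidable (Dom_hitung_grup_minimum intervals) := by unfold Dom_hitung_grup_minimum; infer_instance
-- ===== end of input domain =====

-- B replaces A's hand-written merge sort + first-fit scan over group ends by the builtin
-- stable sort + a min-end greedy over an ascending list of ends (binary-search insert).

-- ===== PORT A =====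
-- iv[0] / iv[1]; exact on Pre_ (every interval has length ≥ 2)
def pvKey (iv : List Int) : Int := PySem.List.pyGetD iv 0 0
def pvEnd (iv : List Int) : Int := PySem.List.pyGetD iv 1 0

-- 'gabung': A's two-index merge loop, taking the left element on ties (stable)
def gabung : List (List Int) → List (List Int) → List (List Int)
  | [], kanan => kanan
  | kiri, [] => kiri
  | x :: xs, y :: ys =>
    if pvKey x ≤ pvKey y then x :: gabung xs (y :: ys)
    else y :: gabung (x :: xs) ys

-- data[:tengah] / data[tengah:] with tengah = len(data)//2 ≥ 0 are exactly take/drop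
def merge_sort_interval (data : List (List Int)) : List (List Int) :=
  if _h : data.length ≤ 1 then data
  else
    gabung (merge_sort_interval (data.take (data.length / 2)))
           (merge_sort_interval (data.drop (data.length / 2)))
  termination_by data.length
  decreasing_by
  · simp only [List.length_take]; omega
  · simp only [List.length_drop]; omega

-- A's inner 'for i in range(len(akhir_grup)) … break' loop: replace the FIRST end < start
def placeFirst (s e : Int) : List Int → Option (List Int)
  | [] => none
  | x :: xs => if s > x then some (e :: xs) else (placeFirst s e xs).map (x :: ·)

def stepA (g : List Int) (iv : List Int) : List Int :=
  match placeFirst (pvKey iv) (pvEnd iv) g with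
  | some g' => g'
  | none => g ++ [pvEnd iv]

def hitung_grup_minimum (intervals : List (List Int)) : Int :=
  (((merge_sort_interval intervals).foldl stepA []).length : Int)

-- ===== PORT B =====
-- Source B's 'while lo < hi' binary search; ends[mid] is in range whenever hi ≤ len ends
def bsearch (ends : List Int) (e : Int) (lo hi : Nat) : Nat :=
  if _h : lo < hi then
    let mid := (lo + hi) / 2
    if PySem.List.pyGetD ends (mid : Int) 0 < e then bsearch ends e (mid + 1) hi
    else bsearch ends e lo mid
  else lo
  termination_by hi - lo
  decreasing_by all_goals omega

-- Source B's 'if ends and ends[0] < iv[0]: ends.pop(0)'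
def popIf (ends : List Int) (s : Int) : List Int :=
  match ends with
  | [] => ends
  | x :: xs => if x < s then xs else x :: xs

-- one iteration of Source B's loop: pop ends[0] if it is < iv[0], then binary-insert iv[1]
def stepB (ends : List Int) (iv : List Int) : List Int :=
  let ends1 := popIf ends (pvKey iv)
  PySem.List.insert ends1 ((bsearch ends1 (pvEnd iv) 0 ends1.length : Nat) : Int) (pvEnd iv)

def hitung_grup_minimum_alt (intervals : List (List Int)) : Int :=
  (((PySem.List.sorted intervals pvKey).foldl stepB []).length : Int)

-- ===== PRECONDITION & SPEC =====
-- Pre_: every interval has at least two entries; on any shorter interval the Python A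
-- raises IndexError (iv[0] / iv[1]), so exactly those inputs are excluded.
def Pre_hitung_grup_minimum (intervals : List (List Int)) : Prop :=
  ∀ iv ∈ intervals, 2 ≤ iv.length
instance (intervals : List (List Int)) : Decidable (Pre_hitung_grup_minimum intervals) := by
  unfold Pre_hitung_grup_minimum; infer_instance

def pvWitness_hitung_grup_minimum : List (List Int) := [[1, 3], [2, 5]]

def Spec_hitung_grup_minimum (intervals : List (List Int)) (out : Int) : Prop := out = hitung_grup_minimum_alt intervals
instance (intervals : List (List Int)) (out : Int) : Decidable (Spec_hitung_grup_minimum intervals out) := by unfold Spec_hitung_grup_minimum; infer_instance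

-- ===== CLAIM (what is proved, stated in full; the proofs are below) =====
def Claim_equal_hitung_grup_minimum : Prop := ∀ (intervals : List (List Int)), Dom_hitung_grup_minimum intervals → Pre_hitung_grup_minimum intervals → Spec_hitung_grup_minimum intervals (hitung_grup_minimum intervals)

-- ===== LEMMAS AND PROOFS =====
def fk (k : Int) (l : List (List Int)) : List (List Int) := l.filter (fun a => pvKey a == k)

theorem fk_nil_of_forall_lt {k : Int} {l : List (List Int)}
    (h : ∀ a ∈ l, k < pvKey a) : fk k l = [] := by
  unfold fk
  rw [List.filter_eq_nil_iff]
  intro a ha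
  simp only [beq_iff_eq]
  exact ne_of_gt (h a ha)

theorem gabung_perm (l r : List (List Int)) : (gabung l r).Perm (l ++ r) := by
  induction l, r using gabung.induct with
  | case1 r => simp [gabung]
  | case2 l h => cases l <;> simp [gabung]
  | case3 x xs y ys hle ih =>
      rw [gabung, if_pos hle]
      exact ih.cons x
  | case4 x xs y ys hle ih =>
      rw [gabung, if_neg hle]
      refine (ih.cons y).trans ?_
      exact (List.perm_middle).symm

theorem gabung_pairwise {l r : List (List Int)}
    (hl : l.Pairwise (fun a b => pvKey a ≤ pvKey b))
    (hr : r.Pairwise (fun a b => pvKey a ≤ pvKey b)) :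
    (gabung l r).Pairwise (fun a b => pvKey a ≤ pvKey b) := by
  induction l, r using gabung.induct with
  | case1 r => simpa [gabung]
  | case2 l h => cases l <;> simp_all [gabung]
  | case3 x xs y ys hle ih =>
      rw [gabung, if_pos hle]
      refine List.pairwise_cons.2 ⟨?_, ih hl.tail hr⟩
      intro a ha
      have ha' := (gabung_perm xs (y :: ys)).mem_iff.1 ha
      rcases List.mem_append.1 ha' with h1 | h2
      · exact (List.pairwise_cons.1 hl).1 a h1
      · rcases List.mem_cons.1 h2 with rfl | h3
        · exact hle
        · exact hle.trans ((List.pairwise_cons.1 hr).1 a h3)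
  | case4 x xs y ys hle ih =>
      rw [gabung, if_neg hle]
      push_neg at hle
      refine List.pairwise_cons.2 ⟨?_, ih hl hr.tail⟩
      intro a ha
      have ha' := (gabung_perm (x :: xs) ys).mem_iff.1 ha
      rcases List.mem_append.1 ha' with h1 | h2
      · rcases List.mem_cons.1 h1 with rfl | h3
        · exact le_of_lt hle
        · exact (le_of_lt hle).trans ((List.pairwise_cons.1 hl).1 a h3)
      · exact (List.pairwise_cons.1 hr).1 a h2

theorem gabung_fk {l r : List (List Int)}
    (hl : l.Pairwise (fun a b => pvKey a ≤ pvKey b)) (k : Int) :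
    fk k (gabung l r) = fk k l ++ fk k r := by
  induction l, r using gabung.induct with
  | case1 r => simp [gabung, fk]
  | case2 l h => cases l <;> simp_all [gabung, fk]
  | case3 x xs y ys hle ih =>
      rw [gabung, if_pos hle]
      show fk k (x :: _) = fk k (x :: xs) ++ _
      have ihh := ih hl.tail
      simp only [fk, List.filter_cons] at ihh ⊢
      rw [ihh]
      by_cases hx : (pvKey x == k) = true <;> simp [hx]
  | case4 x xs y ys hle ih =>
      rw [gabung, if_neg hle]
      push_neg at hle
      show fk k (y :: _) = _ ++ fk k (y :: ys)
      have ihh := ih hl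
      simp only [fk, List.filter_cons] at ihh ⊢
      rw [ihh]
      by_cases hy : (pvKey y == k) = true
      · have hk : pvKey y = k := beq_iff_eq.1 hy
        have hxf : (pvKey x == k) = false := by
          simp only [beq_eq_false_iff_ne, ne_eq]
          omega
        have hxs : List.filter (fun a => pvKey a == k) xs = [] := by
          have h0 : fk k xs = [] := by
            apply fk_nil_of_forall_lt
            intro a ha
            have := (List.pairwise_cons.1 hl).1 a ha
            omega
          simpa [fk] using h0
        simp [hy, hxf, hxs]
      · simp [hy]

theorem ms_pairwise (l : List (List Int)) :
    (merge_sort_interval l).Pairwise (fun a b => pvKey a ≤ pvKey b) := by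
  induction l using merge_sort_interval.induct with
  | case1 l h =>
      rw [merge_sort_interval, dif_pos h]
      rcases l with _ | ⟨a, _ | ⟨b, t⟩⟩ <;> simp_all
  | case2 l h ih1 ih2 =>
      rw [merge_sort_interval, dif_neg h]
      exact gabung_pairwise ih1 ih2

theorem ms_fk (l : List (List Int)) (k : Int) : fk k (merge_sort_interval l) = fk k l := by
  induction l using merge_sort_interval.induct with
  | case1 l h => rw [merge_sort_interval, dif_pos h]
  | case2 l h ih1 ih2 =>
      rw [merge_sort_interval, dif_neg h, gabung_fk (ms_pairwise _) k, ih1, ih2]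
      unfold fk
      rw [← List.filter_append, List.take_append_drop]

theorem insertBy_pairwise {acc : List (List Int)} (x : List Int)
    (h : acc.Pairwise (fun a b => pvKey a ≤ pvKey b)) :
    (PySem.List.insertBy (fun a b => decide (pvKey a < pvKey b)) x acc).Pairwise
      (fun a b => pvKey a ≤ pvKey b) := by
  induction acc with
  | nil => simp [PySem.List.insertBy]
  | cons y ys ih =>
      rw [PySem.List.insertBy]
      by_cases hb : (decide (pvKey x < pvKey y) : Bool) = true
      · rw [if_pos hb]
        have hxy : pvKey x < pvKey y := of_decide_eq_true hb
        refine List.pairwise_cons.2 ⟨?_, h⟩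
        intro a ha
        rcases List.mem_cons.1 ha with rfl | h3
        · exact le_of_lt hxy
        · exact (le_of_lt hxy).trans ((List.pairwise_cons.1 h).1 a h3)
      · rw [if_neg hb]
        have hyx : pvKey y ≤ pvKey x := by
          have hnlt : ¬ pvKey x < pvKey y := by simpa using hb
          omega
        refine List.pairwise_cons.2 ⟨?_, ih h.tail⟩
        intro a ha
        rcases (PySem.List.mem_insertBy _ x a ys).1 ha with rfl | h3
        · exact hyx
        · exact (List.pairwise_cons.1 h).1 a h3

theorem insertBy_fk {acc : List (List Int)} (x : List Int) (k : Int)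
    (h : acc.Pairwise (fun a b => pvKey a ≤ pvKey b)) :
    fk k (PySem.List.insertBy (fun a b => decide (pvKey a < pvKey b)) x acc)
      = if pvKey x == k then fk k acc ++ [x] else fk k acc := by
  induction acc with
  | nil => by_cases hx : (pvKey x == k) = true <;> simp [PySem.List.insertBy, fk, hx]
  | cons y ys ih =>
      rw [PySem.List.insertBy]
      by_cases hb : (decide (pvKey x < pvKey y) : Bool) = true
      · rw [if_pos hb]
        have hxy : pvKey x < pvKey y := of_decide_eq_true hb
        by_cases hx : (pvKey x == k) = true
        · have hk : pvKey x = k := beq_iff_eq.1 hx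
          have hys : List.filter (fun a => pvKey a == k) (y :: ys) = [] := by
            have h0 : fk k (y :: ys) = [] := by
              apply fk_nil_of_forall_lt
              intro a ha
              rcases List.mem_cons.1 ha with rfl | h3
              · omega
              · have := (List.pairwise_cons.1 h).1 a h3; omega
            simpa [fk] using h0
          simp [fk, hx, hys]
        · simp [fk, List.filter_cons, hx]
      · rw [if_neg hb]
        have ihh := ih h.tail
        by_cases hy : (pvKey y == k) = true
        · simp only [fk, List.filter_cons, hy, if_pos] at ihh ⊢
          rw [ihh]
          by_cases hx : (pvKey x == k) = true <;> simp [hx, hy]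
        · simp only [fk, List.filter_cons] at ihh ⊢
          rw [ihh]
          by_cases hx : (pvKey x == k) = true <;> simp [hx, hy]

theorem foldl_insertBy_fk (k : Int) : ∀ (xs acc : List (List Int)),
    acc.Pairwise (fun a b => pvKey a ≤ pvKey b) →
    (xs.foldl (fun acc x => PySem.List.insertBy (fun a b => decide (pvKey a < pvKey b)) x acc) acc).Pairwise (fun a b => pvKey a ≤ pvKey b) ∧
    fk k (xs.foldl (fun acc x => PySem.List.insertBy (fun a b => decide (pvKey a < pvKey b)) x acc) acc)
      = fk k acc ++ fk k xs := by
  intro xs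
  induction xs with
  | nil => intro acc h; simpa [fk] using h
  | cons x xs ih =>
      intro acc h
      have h1 := insertBy_pairwise (acc := acc) x h
      obtain ⟨hp, hf⟩ := ih _ h1
      refine ⟨hp, ?_⟩
      rw [List.foldl_cons] at *
      rw [hf, insertBy_fk x k h]
      by_cases hx : (pvKey x == k) = true <;>
        simp [fk, List.filter_cons, hx]

theorem sorted_fk (l : List (List Int)) (k : Int) :
    fk k (PySem.List.sorted l pvKey) = fk k l := by
  rw [PySem.List.sorted_eq_foldl_insertBy]
  simpa [fk] using (foldl_insertBy_fk k l [] (by simp)).2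

theorem sorted_unique : ∀ (ys zs : List (List Int)),
    ys.Pairwise (fun a b => pvKey a ≤ pvKey b) →
    zs.Pairwise (fun a b => pvKey a ≤ pvKey b) →
    (∀ k, fk k ys = fk k zs) → ys = zs := by
  intro ys
  induction ys with
  | nil =>
      intro zs _ _ hfk
      rcases zs with _ | ⟨z, zs'⟩
      · rfl
      · exfalso
        have := hfk (pvKey z)
        simp [fk, List.filter_cons] at this
  | cons y ys' ih =>
      intro zs hy hz hfk
      rcases zs with _ | ⟨z, zs'⟩
      · exfalso
        have := hfk (pvKey y)
        simp [fk, List.filter_cons] at this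
      · have hyz : y ∈ z :: zs' := by
          have := hfk (pvKey y)
          have hmem : y ∈ fk (pvKey y) (y :: ys') := by simp [fk, List.filter_cons]
          rw [this] at hmem
          exact List.mem_of_mem_filter hmem
        have hzy : z ∈ y :: ys' := by
          have := hfk (pvKey z)
          have hmem : z ∈ fk (pvKey z) (z :: zs') := by simp [fk, List.filter_cons]
          rw [← this] at hmem
          exact List.mem_of_mem_filter hmem
        have hky : pvKey z ≤ pvKey y := by
          rcases List.mem_cons.1 hyz with rfl | h3
          · exact le_refl _
          · exact (List.pairwise_cons.1 hz).1 y h3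
        have hkz : pvKey y ≤ pvKey z := by
          rcases List.mem_cons.1 hzy with rfl | h3
          · exact le_refl _
          · exact (List.pairwise_cons.1 hy).1 z h3
        have hk : pvKey y = pvKey z := le_antisymm hkz hky
        have h0 := hfk (pvKey y)
        simp only [fk, List.filter_cons, beq_self_eq_true, if_pos, hk, beq_iff_eq] at h0
        have h0' : y :: List.filter (fun a => pvKey a == pvKey y) ys'
            = z :: List.filter (fun a => pvKey a == pvKey y) zs' := by
          simpa [hk] using h0
        have hyz2 : y = z := (List.cons.injEq _ _ _ _ ▸ h0').1
        have htail : ∀ k, fk k ys' = fk k zs' := by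
          intro k
          by_cases hkk : k = pvKey y
          · subst hkk
            have := (List.cons.injEq _ _ _ _ ▸ h0').2
            simpa [fk, hk] using this
          · have := hfk k
            simp only [fk, List.filter_cons] at this ⊢
            have hyk : (pvKey y == k) = false := by simp [beq_eq_false_iff_ne]; omega
            have hzk : (pvKey z == k) = false := by simp [beq_eq_false_iff_ne]; omega
            rw [hyk, hzk] at this
            simpa using this
        rw [hyz2, ih zs' hy.tail hz.tail htail]

theorem ms_eq_sorted (l : List (List Int)) :
    merge_sort_interval l = PySem.List.sorted l pvKey := by
  refine sorted_unique _ _ (ms_pairwise l) (PySem.List.sorted_pairwise l pvKey) ?_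
  intro k
  rw [ms_fk, sorted_fk]

def cnt (t : Int) (g : List Int) : Nat := g.countP (fun x => decide (t ≤ x))

theorem placeFirst_none_iff (s e : Int) : ∀ (g : List Int),
    (placeFirst s e g = none ↔ ∀ x ∈ g, ¬ x < s) := by
  intro g
  induction g with
  | nil => simp [placeFirst]
  | cons x xs ih =>
      rw [placeFirst]
      by_cases hx : s > x
      · simp [hx]
      · simp only [if_neg hx, Option.map_eq_none_iff, ih, List.mem_cons]
        constructor
        · rintro hall y (rfl | hy)
          · omega
          · exact hall y hy
        · intro hall y hy
          exact hall y (Or.inr hy)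

theorem placeFirst_some (s e : Int) : ∀ (g g' : List Int), placeFirst s e g = some g' →
    g'.length = g.length ∧ ∀ t, s ≤ t → cnt t g' = cnt t g + (if t ≤ e then 1 else 0) := by
  intro g
  induction g with
  | nil => intro g' h; simp [placeFirst] at h
  | cons x xs ih =>
      intro g' h
      rw [placeFirst] at h
      by_cases hx : s > x
      · rw [if_pos hx] at h
        obtain rfl : e :: xs = g' := Option.some.injEq _ _ ▸ h
        refine ⟨by simp, ?_⟩
        intro t ht
        have hné : ¬ (t ≤ x) := by omega
        by_cases he : t ≤ e <;> simp [cnt, List.countP_cons, hné, he] <;> try omega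
      · rw [if_neg hx] at h
        obtain ⟨g'', hg'', rfl⟩ := Option.map_eq_some_iff.1 h
        obtain ⟨hlen, hcnt⟩ := ih g'' hg''
        refine ⟨by simp [hlen], ?_⟩
        intro t ht
        have := hcnt t ht
        by_cases htx : t ≤ x <;> simp [cnt, List.countP_cons, htx] at this ⊢ <;> omega

theorem countP_ge_of_getElem {h : List Int} (p : Int → Bool)
    (hp : h.Pairwise (· ≤ ·)) (hmono : ∀ a b : Int, a ≤ b → p b → p a)
    {i : Nat} (hi : i < h.length) (hpi : p h[i]) : i + 1 ≤ h.countP p := by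
  have hsplit : h.countP p = (h.take (i+1)).countP p + (h.drop (i+1)).countP p := by
    conv_lhs => rw [← List.take_append_drop (i+1) h]
    rw [List.countP_append]
  have htake : (h.take (i+1)).countP p = (h.take (i+1)).length := by
    rw [List.countP_eq_length]
    intro a ha
    obtain ⟨j, hj, rfl⟩ := List.mem_iff_getElem.1 ha
    rw [List.getElem_take]
    have hjlen : j < h.length := by
      have := hj; simp [List.length_take] at this; omega
    have hji : j ≤ i := by
      have := hj; simp [List.length_take] at this; omega
    have hle : h[j] ≤ h[i] := by
      rcases Nat.lt_or_ge j i with hlt | hge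
      · exact (List.pairwise_iff_getElem.1 hp) j i hjlen hi hlt
      · have : j = i := by omega
        subst this; exact le_refl _
    exact hmono _ _ hle hpi
  have : (h.take (i+1)).length = i + 1 := by simp [List.length_take]; omega
  omega

theorem countP_le_of_getElem {h : List Int} (p : Int → Bool)
    (hp : h.Pairwise (· ≤ ·)) (hmono : ∀ a b : Int, a ≤ b → p b → p a)
    {i : Nat} (hi : i < h.length) (hpi : ¬ p h[i]) : h.countP p ≤ i := by
  have hsplit : h.countP p = (h.take i).countP p + (h.drop i).countP p := by
    conv_lhs => rw [← List.take_append_drop i h]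
    rw [List.countP_append]
  have hdrop : (h.drop i).countP p = 0 := by
    rw [List.countP_eq_zero]
    intro a ha
    obtain ⟨j, hj, rfl⟩ := List.mem_iff_getElem.1 ha
    rw [List.getElem_drop]
    have hjlen : i + j < h.length := by
      have := hj; simp [List.length_drop] at this; omega
    have hle : h[i] ≤ h[i+j] := by
      rcases Nat.eq_zero_or_pos j with rfl | hpos
      · simp
      · exact (List.pairwise_iff_getElem.1 hp) i (i+j) hi hjlen (by omega)
    intro hpa
    exact hpi (hmono _ _ hle hpa)
  have : (h.take i).countP p ≤ i := by
    calc (h.take i).countP p ≤ (h.take i).length := List.countP_le_length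
    _ ≤ i := by simp [List.length_take]
  omega

theorem bsearch_eq (ends : List Int) (e : Int) (hs : ends.Pairwise (· ≤ ·)) :
    ∀ (n lo hi : Nat), hi - lo ≤ n → hi ≤ ends.length →
    lo ≤ ends.countP (fun x => decide (x < e)) → ends.countP (fun x => decide (x < e)) ≤ hi →
    bsearch ends e lo hi = ends.countP (fun x => decide (x < e)) := by
  have hmono : ∀ a b : Int, a ≤ b → decide (b < e) = true → decide (a < e) = true := by
    intro a b hab hb; simp at hb ⊢; omega
  intro n
  induction n with
  | zero =>
      intro lo hi hn hhi hlo hc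
      rw [bsearch, dif_neg (by omega)]
      omega
  | succ n ih =>
      intro lo hi hn hhi hlo hc
      by_cases hlt : lo < hi
      · rw [bsearch, dif_pos hlt]
        have hmid1 : lo ≤ (lo + hi) / 2 := by omega
        have hmid2 : (lo + hi) / 2 < hi := by omega
        have hmlen : (lo + hi) / 2 < ends.length := by omega
        have hget : PySem.List.pyGetD ends (((lo + hi) / 2 : Nat) : Int) 0
            = ends[(lo + hi) / 2] := by
          rw [PySem.List.pyGetD_eq_getElem ends 0 (by positivity) (by exact_mod_cast hmlen)]
          have hidx : (((lo : Int) + (hi : Int)) / 2).toNat = (lo + hi) / 2 := by omega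
          simp [hidx]
        show (if PySem.List.pyGetD ends (((lo + hi) / 2 : Nat) : Int) 0 < e then
            bsearch ends e ((lo + hi) / 2 + 1) hi else bsearch ends e lo ((lo + hi) / 2))
            = ends.countP (fun x => decide (x < e))
        by_cases hb : ends[(lo + hi) / 2] < e
        · rw [if_pos (by rw [hget]; exact hb)]
          have hge := countP_ge_of_getElem (fun x => decide (x < e)) hs hmono hmlen (by simpa using hb)
          exact ih ((lo + hi) / 2 + 1) hi (by omega) hhi (by omega) hc
        · rw [if_neg (by rw [hget]; exact hb)]
          have hle := countP_le_of_getElem (fun x => decide (x < e)) hs hmono hmlen (by simpa using hb)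
          exact ih lo ((lo + hi) / 2) (by omega) (by omega) hlo (by omega)
      · rw [bsearch, dif_neg hlt]
        omega

theorem stepB_insert (h1 : List Int) (e : Int) (hs : h1.Pairwise (· ≤ ·)) :
    (PySem.List.insert h1 ((bsearch h1 e 0 h1.length : Nat) : Int) e).Perm (e :: h1) ∧
    (PySem.List.insert h1 ((bsearch h1 e 0 h1.length : Nat) : Int) e).Pairwise (· ≤ ·) := by
  have hmono : ∀ a b : Int, a ≤ b → decide (b < e) = true → decide (a < e) = true := by
    intro a b hab hb; simp at hb ⊢; omega
  set c := h1.countP (fun x => decide (x < e)) with hc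
  have hclen : c ≤ h1.length := List.countP_le_length
  have hbs : bsearch h1 e 0 h1.length = c :=
    bsearch_eq h1 e hs h1.length 0 h1.length (by omega) (le_refl _) (by omega) hclen
  rw [hbs, PySem.List.insert_natCast h1 c e hclen]
  have htake_lt : ∀ a ∈ h1.take c, a < e := by
    intro a ha
    obtain ⟨j, hj, rfl⟩ := List.mem_iff_getElem.1 ha
    rw [List.getElem_take]
    have hjc : j < c := by have := hj; simp [List.length_take] at this; omega
    have hjlen : j < h1.length := by omega
    by_contra hcon
    have := countP_le_of_getElem (fun x => decide (x < e)) hs hmono hjlen (by simpa using hcon)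
    omega
  have hdrop_ge : ∀ a ∈ h1.drop c, e ≤ a := by
    intro a ha
    obtain ⟨j, hj, rfl⟩ := List.mem_iff_getElem.1 ha
    rw [List.getElem_drop]
    have hjlen : c + j < h1.length := by have := hj; simp [List.length_drop] at this; omega
    by_contra hcon
    have := countP_ge_of_getElem (fun x => decide (x < e)) hs hmono hjlen (by simp; omega)
    omega
  constructor
  · refine List.perm_middle.trans ?_
    rw [List.take_append_drop]
  · rw [List.pairwise_append]
    refine ⟨hs.sublist (List.take_sublist _ _), ?_, ?_⟩
    · refine List.pairwise_cons.2 ⟨hdrop_ge, hs.sublist (List.drop_sublist _ _)⟩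
    · intro a ha b hb
      rcases List.mem_cons.1 hb with rfl | hb'
      · exact le_of_lt (htake_lt a ha)
      · exact le_of_lt (lt_of_lt_of_le (htake_lt a ha) (hdrop_ge b hb'))

theorem exists_lt_iff_cnt_ne (s : Int) (g : List Int) :
    (∃ x ∈ g, x < s) ↔ cnt s g ≠ g.length := by
  unfold cnt
  rw [Ne, List.countP_eq_length]
  constructor
  · rintro ⟨x, hx, hxs⟩ hall
    have := hall x hx
    simp at this
    omega
  · intro hno
    by_contra hcon
    apply hno
    intro a ha
    simp
    by_contra h2
    exact hcon ⟨a, ha, by omega⟩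

theorem couple : ∀ (R : List (List Int)) (g h : List Int) (b : Int),
    R.Pairwise (fun a b => pvKey a ≤ pvKey b) →
    (∀ iv ∈ R, b ≤ pvKey iv) →
    h.Pairwise (· ≤ ·) →
    g.length = h.length →
    (∀ t : Int, b ≤ t → cnt t g = cnt t h) →
    (R.foldl stepA g).length = (R.foldl stepB h).length := by
  intro R
  induction R with
  | nil => intro g h b _ _ _ hlen _; simpa using hlen
  | cons iv R' ih =>
      intro g h b hpw hb hsh hlen hcnt
      have hbs : b ≤ pvKey iv := hb iv List.mem_cons_self
      have hcs : cnt (pvKey iv) g = cnt (pvKey iv) h := hcnt _ hbs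
      have hb' : ∀ iv' ∈ R', pvKey iv ≤ pvKey iv' := (List.pairwise_cons.1 hpw).1
      simp only [List.foldl_cons]
      by_cases hpop : ∃ x ∈ h, x < pvKey iv
      · -- both reuse a group
        have hgx : ∃ x ∈ g, x < pvKey iv := by
          rw [exists_lt_iff_cnt_ne] at hpop ⊢
          omega
        rcases h with _ | ⟨x, xs⟩
        · simp at hpop
        · have hx : x < pvKey iv := by
            obtain ⟨w, hw, hws⟩ := hpop
            rcases List.mem_cons.1 hw with rfl | hw'
            · exact hws
            · exact lt_of_le_of_lt ((List.pairwise_cons.1 hsh).1 w hw') hws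
          obtain ⟨g', hg'⟩ : ∃ g', placeFirst (pvKey iv) (pvEnd iv) g = some g' := by
            rcases hpf : placeFirst (pvKey iv) (pvEnd iv) g with _ | g'
            · exfalso
              obtain ⟨w, hw, hws⟩ := hgx
              exact (placeFirst_none_iff _ _ g).1 hpf w hw hws
            · exact ⟨g', rfl⟩
          have hstepA : stepA g iv = g' := by simp [stepA, hg']
          have hstepB : stepB (x :: xs) iv
              = PySem.List.insert xs ((bsearch xs (pvEnd iv) 0 xs.length : Nat) : Int) (pvEnd iv) := by
            rw [stepB]
            simp [popIf, hx]
          rw [hstepA, hstepB]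
          obtain ⟨hplen, hpcnt⟩ := placeFirst_some _ _ g g' hg'
          obtain ⟨hperm, hpair⟩ := stepB_insert xs (pvEnd iv) hsh.tail
          refine ih g' _ (pvKey iv) hpw.tail hb' hpair ?_ ?_
          · rw [hplen, hlen, PySem.List.length_insert]
            simp
          · intro t ht
            rw [hpcnt t ht]
            have h2 : cnt t (PySem.List.insert xs ((bsearch xs (pvEnd iv) 0 xs.length : Nat) : Int) (pvEnd iv))
                = (if t ≤ pvEnd iv then 1 else 0) + cnt t xs := by
              unfold cnt
              rw [hperm.countP_eq]
              simp [List.countP_cons]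
              by_cases hte : t ≤ pvEnd iv <;> simp [hte] <;> omega
            rw [h2]
            have h3 : cnt t (x :: xs) = cnt t xs := by
              have : ¬ (t ≤ x) := by omega
              simp [cnt, List.countP_cons, this]
            have h4 : cnt t g = cnt t (x :: xs) := hcnt t (le_trans hbs ht)
            omega
      · -- both open a new group
        have hends1 : popIf h (pvKey iv) = h := by
          rcases h with _ | ⟨x, xs⟩
          · rfl
          · have hno : ¬ x < pvKey iv := fun hc => hpop ⟨x, List.mem_cons_self, hc⟩
            simp [popIf, hno]
        have hgnone : placeFirst (pvKey iv) (pvEnd iv) g = none := by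
          rw [placeFirst_none_iff]
          intro x hx hxs
          have hgx : ∃ x ∈ g, x < pvKey iv := ⟨x, hx, hxs⟩
          rw [exists_lt_iff_cnt_ne] at hgx hpop
          push_neg at hpop
          omega
        have hstepA : stepA g iv = g ++ [pvEnd iv] := by simp [stepA, hgnone]
        have hstepB : stepB h iv
            = PySem.List.insert h ((bsearch h (pvEnd iv) 0 h.length : Nat) : Int) (pvEnd iv) := by
          rw [stepB, hends1]
        rw [hstepA, hstepB]
        obtain ⟨hperm, hpair⟩ := stepB_insert h (pvEnd iv) hsh
        refine ih _ _ (pvKey iv) hpw.tail hb' hpair ?_ ?_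
        · rw [PySem.List.length_insert]
          simp [hlen]
        · intro t ht
          have h1 : cnt t (g ++ [pvEnd iv]) = cnt t g + (if t ≤ pvEnd iv then 1 else 0) := by
            by_cases hte : t ≤ pvEnd iv <;>
              simp [cnt, List.countP_append, List.countP_cons, hte]
          have h2 : cnt t (PySem.List.insert h ((bsearch h (pvEnd iv) 0 h.length : Nat) : Int) (pvEnd iv))
              = (if t ≤ pvEnd iv then 1 else 0) + cnt t h := by
            unfold cnt
            rw [hperm.countP_eq]
            simp [List.countP_cons]
            by_cases hte : t ≤ pvEnd iv <;> simp [hte] <;> omega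
          rw [h1, h2]
          have := hcnt t (le_trans hbs ht)
          omega

-- ===== VERDICT (by name: the statement is the Claim_ definition above) =====
theorem hitung_grup_minimum_spec : Claim_equal_hitung_grup_minimum := by
  intro intervals _ _
  unfold Spec_hitung_grup_minimum hitung_grup_minimum hitung_grup_minimum_alt
  rw [ms_eq_sorted]
  rcases hR : PySem.List.sorted intervals pvKey with _ | ⟨iv0, R'⟩
  · rfl
  · have hpw := PySem.List.sorted_pairwise intervals pvKey
    rw [hR] at hpw
    have := couple (iv0 :: R') [] [] (pvKey iv0) hpw
      (by intro iv hm; rcases List.mem_cons.1 hm with rfl | hm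
          · exact le_refl _
          · exact (List.pairwise_cons.1 hpw).1 iv hm)
      (by simp) rfl (by intro t _; rfl)
    exact_mod_cast this
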